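-- pv_equiv track=rewrite | github.com/aimin-tang/comp_programming | intro/ch4/ch4_q4_cses1163.py | solve
-- ===== SOURCE A (Python) =====
-- def get_gaps(points):
--     result = []
--     for idx in range(1, len(points)):
--         result.append(points[idx] - points[idx-1])
--
--     return result
--
-- def solve(x, lights):
--     points = [0, x]
--     result = []
--
--     for light in lights:
--         points.append(light)
--         points.sort()
--         gaps = get_gaps(points)
--         result.append(max(gaps))
--
--     return result
-- ===== SOURCE B (Python) =====
-- def solve(x, lights):
--     # Offline: sort all points once, tagged with the step at which each appears
--     # (0 and x at step 0, lights[i] at step i+1); the answer for step t is the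
--     # max adjacent difference of the values whose tag is <= t.
--     pts = sorted([(0, 0), (x, 0)] + [(v, i) for i, v in enumerate(lights, 1)],
--                  key=lambda p: p[0])
--     res = []
--     for t in range(1, len(lights) + 1):
--         vals = [v for v, s in pts if s <= t]
--         res.append(max(b - a for a, b in zip(vals, vals[1:])))
--     return res
-- ===== Notes on version B (the rewrite author's own statement) =====
-- stated objective: alternative
-- what changed: B replaces A's per-step re-sort of a growing point list by an offline scheme: all points are sorted once, each tagged with the step at which it appears, and each step's answer is the max adjacent difference over one filtered scan of that fixed array.
import Mathlib
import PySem

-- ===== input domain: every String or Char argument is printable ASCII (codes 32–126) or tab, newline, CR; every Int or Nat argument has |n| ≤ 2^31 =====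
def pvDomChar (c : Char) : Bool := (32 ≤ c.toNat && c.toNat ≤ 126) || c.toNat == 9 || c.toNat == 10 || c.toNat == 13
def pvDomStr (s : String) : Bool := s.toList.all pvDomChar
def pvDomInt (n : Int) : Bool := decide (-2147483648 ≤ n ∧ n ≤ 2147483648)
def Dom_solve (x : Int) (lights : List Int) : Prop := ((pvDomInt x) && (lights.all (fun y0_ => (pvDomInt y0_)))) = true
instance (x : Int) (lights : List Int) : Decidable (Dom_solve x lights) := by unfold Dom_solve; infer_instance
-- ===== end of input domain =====

-- B sorts all the points ONCE, each tagged with the step at which it appears, and answers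
-- each step by one filtered scan of that array — instead of A's re-sort of a growing list
-- at every step (alternative decomposition; no measured speed claim).

-- ===== PORT A =====
-- indices produced by the range are always in bounds, so the default 0 of pyGetD is never used
def get_gaps (points : List Int) : List Int :=
  (PySem.List.pyRange 1 (points.length : Int) 1).foldl
    (fun result idx =>
      result ++ [PySem.List.pyGetD points idx 0 - PySem.List.pyGetD points (idx - 1) 0]) []

-- loop body of A's for-loop; max(gaps) is taken with default 0 (never used: gaps is nonempty)
def solveStepA (st : List Int × List Int) (light : Int) : List Int × List Int :=
  let points := PySem.List.sorted (st.1 ++ [light]) (fun y => y) false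
  (points, st.2 ++ [(PySem.List.max? (get_gaps points) (fun y => y)).getD 0])

def solve (x : Int) (lights : List Int) : List Int :=
  (lights.foldl solveStepA ([0, x], [])).2

-- ===== PORT B =====
-- the decorated point array of Source B: sorted once by value, tagged with its step
def ptsOf (x : Int) (lights : List Int) : List (Int × Int) :=
  PySem.List.sorted
    ([((0 : Int), (0 : Int)), (x, 0)] ++ (PySem.List.enumerate lights 1).map (fun p => (p.2, p.1)))
    (fun p => p.1) false

-- loop body of Source B's for-loop: filtered scan, then max of adjacent differences
-- (max(...) over an empty generator would raise; unreachable here, `vals` always has ≥ 2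
-- elements, so the default 0 is never used)
def bansStep (pts : List (Int × Int)) (res : List Int) (t : Int) : List Int :=
  let vals := (pts.filter (fun p => decide (p.2 ≤ t))).map (fun p => p.1)
  res ++ [(PySem.List.max?
    ((List.zip vals (PySem.List.slice vals (some 1) none)).map (fun pr => pr.2 - pr.1))
    (fun y => y)).getD 0]

def solve_alt (x : Int) (lights : List Int) : List Int :=
  (PySem.List.pyRange 1 ((lights.length : Int) + 1) 1).foldl (bansStep (ptsOf x lights)) []

-- ===== PRECONDITION & SPEC =====
def Spec_solve (x : Int) (lights : List Int) (out : List Int) : Prop := out = solve_alt x lights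
instance (x : Int) (lights : List Int) (out : List Int) : Decidable (Spec_solve x lights out) := by unfold Spec_solve; infer_instance

-- ===== CLAIM (what is proved, stated in full; the proofs are below) =====
def Claim_equal_solve : Prop := ∀ (x : Int) (lights : List Int), Dom_solve x lights → Spec_solve x lights (solve x lights)

-- ===== LEMMAS AND PROOFS =====

-- adjacent differences, structurally
def gapsRec : List Int → List Int
  | a :: b :: t => (b - a) :: gapsRec (b :: t)
  | _ => []

theorem gapsRec_length : ∀ (l : List Int), (gapsRec l).length = l.length - 1 := by
  intro l
  induction l with
  | nil => simp [gapsRec]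
  | cons a t ih =>
    cases t with
    | nil => simp [gapsRec]
    | cons b u => simp [gapsRec] at ih ⊢; omega

theorem gapsRec_getElem : ∀ (l : List Int) (i : ℕ) (h : i < (gapsRec l).length),
    (gapsRec l)[i] = l.getD (i + 1) 0 - l.getD i 0 := by
  intro l
  induction l with
  | nil => intro i h; simp [gapsRec] at h
  | cons a t ih =>
    cases t with
    | nil => intro i h; simp [gapsRec] at h
    | cons b u =>
      intro i h
      cases i with
      | zero => simp [gapsRec]
      | succ i =>
        have h' : i < (gapsRec (b :: u)).length := by
          simpa [gapsRec] using h
        simp only [gapsRec, List.getElem_cons_succ, List.getD_cons_succ]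
        exact ih i h'

theorem natGaps (pts : List Int) (s : ℕ) (hs : 1 ≤ s) :
    (List.range (pts.length - s)).map
      (fun k => pts.getD (s + k) 0 - pts.getD (s + k - 1) 0)
      = gapsRec (pts.drop (s - 1)) := by
  apply List.ext_getElem
  · simp [gapsRec_length]; omega
  · intro i h1 h2
    have hi : i < pts.length - s := by simpa using h1
    rw [List.getElem_map, List.getElem_range, gapsRec_getElem]
    have e1 : (pts.drop (s - 1)).getD (i + 1) 0 = pts.getD (s - 1 + (i + 1)) 0 := by
      simp [List.getD, List.getElem?_drop]
    have e2 : (pts.drop (s - 1)).getD i 0 = pts.getD (s - 1 + i) 0 := by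
      simp [List.getD, List.getElem?_drop]
    rw [e1, e2]
    have e3 : s - 1 + (i + 1) = s + i := by omega
    have e4 : s - 1 + i = s + i - 1 := by omega
    rw [e3, e4]

theorem pyRangeGaps (pts : List Int) (s : ℕ) (hs : 1 ≤ s) :
    (PySem.List.pyRange (s : Int) (pts.length : Int) 1).map
      (fun j => PySem.List.pyGetD pts j 0 - PySem.List.pyGetD pts (j - 1) 0)
      = gapsRec (pts.drop (s - 1)) := by
  rw [PySem.List.pyRange_one, List.map_map]
  have h1 : ((pts.length : Int) - (s : Int)).toNat = pts.length - s := by omega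
  rw [h1, ← natGaps pts s hs]
  apply List.map_congr_left
  intro k hk
  simp only [Function.comp]
  have e1 : (s : Int) + (k : Int) = ((s + k : ℕ) : Int) := by push_cast; ring
  have e2 : ((s + k : ℕ) : Int) - 1 = ((s + k - 1 : ℕ) : Int) := by omega
  rw [e1, e2, PySem.List.pyGetD_natCast, PySem.List.pyGetD_natCast]

theorem get_gaps_eq (pts : List Int) : get_gaps pts = gapsRec pts := by
  unfold get_gaps
  rw [PySem.List.foldl_append_singleton_eq_map]
  have := pyRangeGaps pts 1 (by omega)
  simpa using this

theorem gapsRec_eq_zip : ∀ (l : List Int),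
    gapsRec l = (List.zip l l.tail).map (fun pr => pr.2 - pr.1) := by
  intro l
  induction l with
  | nil => simp [gapsRec]
  | cons a t ih =>
    cases t with
    | nil => simp [gapsRec]
    | cons b u => simp only [gapsRec, List.tail_cons, List.zip_cons_cons, List.map_cons]
                  rw [ih]; rfl

-- the filtered scan of B
def valsOf (pts : List (Int × Int)) (t : Int) : List Int :=
  (pts.filter (fun p => decide (p.2 ≤ t))).map (fun p => p.1)

theorem bansStep_eq (pts : List (Int × Int)) (res : List Int) (t : Int) :
    bansStep pts res t
      = res ++ [(PySem.List.max? (gapsRec (valsOf pts t)) (fun y => y)).getD 0] := by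
  simp only [bansStep, valsOf, gapsRec_eq_zip, PySem.List.slice_from_one]

theorem enum_filter : ∀ (l : List Int) (s t : Int),
    ((PySem.List.enumerate l s).filter (fun q => decide (q.1 ≤ t))).map (fun q => q.2)
      = l.take (t - s + 1).toNat := by
  intro l
  induction l with
  | nil => intro s t; simp [PySem.List.enumerate_nil]
  | cons a l ih =>
    intro s t
    rw [PySem.List.enumerate_cons]
    by_cases hs : s ≤ t
    · have h1 : (t - s + 1).toNat = (t - (s + 1) + 1).toNat + 1 := by omega
      simp only [List.filter_cons, decide_eq_true_eq, if_pos hs, List.map_cons, ih, h1,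
        List.take_succ_cons]
    · have h1 : (t - s + 1).toNat = 0 := by omega
      have h2 : (t - (s + 1) + 1).toNat = 0 := by omega
      simp only [List.filter_cons, decide_eq_true_eq, if_neg hs, ih, h1, h2, List.take_zero]

theorem valsOf_perm (x : Int) (lights : List Int) (t : Int) (ht : 1 ≤ t) :
    (valsOf (ptsOf x lights) t).Perm (0 :: x :: lights.take t.toNat) := by
  have hperm := PySem.List.sorted_perm
    (xs := [((0 : Int), (0 : Int)), (x, 0)] ++ (PySem.List.enumerate lights 1).map (fun p => (p.2, p.1)))
    (key := fun p => p.1) (rev := false)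
  have h1 : (valsOf (ptsOf x lights) t).Perm
      (valsOf ([((0 : Int), (0 : Int)), (x, 0)] ++ (PySem.List.enumerate lights 1).map (fun p => (p.2, p.1))) t) := by
    exact (hperm.filter _).map _
  have h0t : ((0 : Int) ≤ t) := by omega
  have h2 : valsOf ([((0 : Int), (0 : Int)), (x, 0)] ++ (PySem.List.enumerate lights 1).map (fun p => (p.2, p.1))) t
      = 0 :: x :: lights.take t.toNat := by
    simp only [valsOf, List.filter_append, List.filter_cons, List.filter_nil, decide_eq_true_eq]
    rw [if_pos h0t, if_pos h0t]
    simp only [List.cons_append, List.nil_append, List.map_cons]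
    congr 1
    congr 1
    rw [List.filter_map, List.map_map]
    have h3 := enum_filter lights 1 t
    rw [show (t - 1 + 1).toNat = t.toNat by omega] at h3
    exact h3
  rw [h2] at h1
  exact h1

theorem valsOf_pairwise (x : Int) (lights : List Int) (t : Int) :
    (valsOf (ptsOf x lights) t).Pairwise (· ≤ ·) := by
  have h := PySem.List.sorted_pairwise
    (xs := [((0 : Int), (0 : Int)), (x, 0)] ++ (PySem.List.enumerate lights 1).map (fun p => (p.2, p.1)))
    (key := fun p => p.1)
  unfold valsOf ptsOf
  exact List.pairwise_map.mpr (h.filter _)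

-- P, a sorted permutation of the first t points, IS B's filtered scan at time t
theorem vals_eq (x : Int) (lights : List Int) (t : ℕ) (ht : 1 ≤ t)
    (P : List Int) (hperm : P.Perm (0 :: x :: lights.take t))
    (hsort : P.Pairwise (· ≤ ·)) :
    valsOf (ptsOf x lights) (t : Int) = P := by
  apply PySem.List.eq_of_perm_of_pairwise_le_of_injective (fun y => y) (fun a b h => h)
  · have h1 := valsOf_perm x lights (t : Int) (by exact_mod_cast ht)
    have h2 : ((t : Int)).toNat = t := by omega
    rw [h2] at h1
    exact h1.trans hperm.symm
  · exact valsOf_pairwise x lights (t : Int)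
  · exact hsort

theorem main_loop : ∀ (rest : List Int) (x : Int) (lights : List Int) (k : ℕ) (P res : List Int),
    rest = lights.drop k → k ≤ lights.length →
    P.Perm (0 :: x :: lights.take k) →
    (rest.foldl solveStepA (P, res)).2
      = (PySem.List.pyRange ((k : Int) + 1) ((lights.length : Int) + 1) 1).foldl
          (bansStep (ptsOf x lights)) res := by
  intro rest
  induction rest with
  | nil =>
    intro x lights k P res hdrop hk hperm
    have hlend := congrArg List.length hdrop
    simp only [List.length_nil, List.length_drop] at hlend
    rw [PySem.List.pyRange_one_eq_nil (by omega)]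
    rfl
  | cons l rest' ih =>
    intro x lights k P res hdrop hk hperm
    have hlend := congrArg List.length hdrop
    simp only [List.length_cons, List.length_drop] at hlend
    have hklt : k < lights.length := by omega
    have hsplit : lights.take k ++ (l :: rest') = lights := by
      rw [hdrop]; exact List.take_append_drop k lights
    have htake : lights.take (k + 1) = lights.take k ++ [l] := by
      have hlt : (lights.take k).length = k := by rw [List.length_take]; omega
      conv_lhs => rw [← hsplit]
      rw [List.take_append, hlt, List.take_take, show min (k + 1) k = k from by omega,
        show k + 1 - k = 1 from by omega]
      simp
    have hrest' : rest' = lights.drop (k + 1) := by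
      have hdd : (lights.drop k).drop 1 = lights.drop (k + 1) := by rw [List.drop_drop]
      rw [← hdd, ← hdrop]
      rfl
    -- the new sorted point list
    set P' := PySem.List.sorted (P ++ [l]) (fun y => y) false with hP'
    have hP'perm : P'.Perm (0 :: x :: lights.take (k + 1)) := by
      have h2 : (P ++ [l]).Perm ((0 :: x :: lights.take k) ++ [l]) := hperm.append_right [l]
      have h3 : (0 :: x :: lights.take k) ++ [l] = 0 :: x :: lights.take (k + 1) := by
        rw [htake]; simp
      rw [h3] at h2
      exact (PySem.List.sorted_perm _ _ _).trans h2
    have hP'sort : P'.Pairwise (· ≤ ·) := by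
      have := PySem.List.sorted_pairwise (xs := P ++ [l]) (key := fun y => y)
      simpa using this
    have hv : valsOf (ptsOf x lights) ((k : Int) + 1) = P' := by
      have := vals_eq x lights (k + 1) (by omega) P' hP'perm hP'sort
      rwa [show (((k + 1 : ℕ)) : Int) = (k : Int) + 1 by push_cast; ring] at this
    rw [PySem.List.pyRange_one_cons (by omega)]
    simp only [List.foldl_cons]
    rw [bansStep_eq, hv]
    have hstep : solveStepA (P, res) l
        = (P', res ++ [(PySem.List.max? (gapsRec P') (fun y => y)).getD 0]) := by
      simp only [solveStepA, ← hP', get_gaps_eq]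
    rw [hstep]
    have ih' := ih x lights (k + 1) P'
      (res ++ [(PySem.List.max? (gapsRec P') (fun y => y)).getD 0]) hrest' (by omega) hP'perm
    rw [show (((k + 1 : ℕ) : Int)) + 1 = ((k : Int) + 1) + 1 from by push_cast; ring] at ih'
    exact ih'

-- ===== VERDICT (by name: the statement is the Claim_ definition above) =====
theorem solve_spec : Claim_equal_solve := by
  intro x lights _
  unfold Spec_solve solve solve_alt
  have := main_loop lights x lights 0 [0, x] [] (by simp) (by omega) (by simp)
  rw [this]
  norm_num
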